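-- pv_equiv track=rewrite | github.com/howtocuddle/ddc-automation | fix_hierarchy_bruteforce_ranges.py | immediate_children_simple
-- ===== SOURCE A (Python) =====
-- from typing import Dict, List, Set, Tuple
--
-- def immediate_children_simple(codes: List[str]) -> Dict[str, Set[str]]:
--     children: Dict[str, Set[str]] = {c: set() for c in codes}
--     for c in codes:
--         if '-' in c:  # skip range for simple child logic
--             continue
--         prefix = c + '.'
--         plen = len(prefix)
--         for d in codes:
--             if d.startswith(prefix) and '-' not in d:
--                 remainder = d[plen:]
--                 if remainder and '.' not in remainder:
--                     children[c].add(d)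
--     return children
-- ===== SOURCE B (Python) =====
-- from typing import Dict, List, Set
--
-- def immediate_children_simple(codes: List[str]) -> Dict[str, Set[str]]:
--     children: Dict[str, Set[str]] = {c: set() for c in codes}
--     for d in codes:
--         if '-' in d or '.' not in d:
--             continue
--         parent, last = d.rsplit('.', 1)
--         if last and parent in children:
--             children[parent].add(d)
--     return children
-- ===== Notes on version B (the rewrite author's own statement) =====
-- stated objective: faster
-- what changed: Instead of scanning all codes once per candidate parent (nested loops testing startswith/remainder), B makes a single pass over codes and registers each code under its computed parent via rsplit('.', 1) and a dict lookup.
import Mathlib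
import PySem

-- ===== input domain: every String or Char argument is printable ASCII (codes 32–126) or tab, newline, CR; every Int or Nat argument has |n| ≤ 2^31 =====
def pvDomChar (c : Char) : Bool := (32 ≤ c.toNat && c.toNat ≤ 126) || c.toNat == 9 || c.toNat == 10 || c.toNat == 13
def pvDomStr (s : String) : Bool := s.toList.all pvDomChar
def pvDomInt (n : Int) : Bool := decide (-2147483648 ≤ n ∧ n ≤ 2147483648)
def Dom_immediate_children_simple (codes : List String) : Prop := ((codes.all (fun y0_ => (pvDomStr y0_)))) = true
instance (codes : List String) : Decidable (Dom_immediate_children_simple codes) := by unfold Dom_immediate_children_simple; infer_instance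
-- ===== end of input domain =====

-- B replaces A's quadratic parent-by-parent rescans with one pass that registers each code under its parent computed by rsplit('.', 1).

-- ===== PORT A =====
def immediate_children_simple (codes : List String) : List (String × List String) :=
  let children : PySem.Dict String (PySem.Set String) :=
    codes.foldl (fun d c => d.insert c PySem.Set.empty) PySem.Dict.empty
  let children := codes.foldl (fun d c =>
    if PySem.Str.isIn "-" c then d
    else
      let pre := c ++ "."
      let plen := PySem.Str.len pre
      codes.foldl (fun d2 dd =>
        if PySem.Str.startswith dd pre && !PySem.Str.isIn "-" dd then
          let remainder := PySem.Str.slice dd (some plen) none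
          if remainder != "" && !PySem.Str.isIn "." remainder then
            d2.modify c PySem.Set.empty (fun s => PySem.Set.add s dd)
          else d2
        else d2) d) children
  children.items

-- ===== PORT B =====
-- hand port of d.rsplit('.', 1) for a string that contains '.' (the only case B reaches it):
-- (everything before the last '.', everything after it); exact there.
def rsplitDot (cs : List Char) : List Char × List Char :=
  (((cs.reverse.dropWhile (· != '.')).tail).reverse, (cs.reverse.takeWhile (· != '.')).reverse)

def immediate_children_simple_alt (codes : List String) : List (String × List String) :=
  let children : PySem.Dict String (PySem.Set String) :=
    codes.foldl (fun d c => d.insert c PySem.Set.empty) PySem.Dict.empty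
  let children := codes.foldl (fun d dd =>
    if PySem.Str.isIn "-" dd || !PySem.Str.isIn "." dd then d
    else
      let ps := rsplitDot dd.toList
      let parent := String.ofList ps.1
      let last := String.ofList ps.2
      if last != "" && d.contains parent then
        d.modify parent PySem.Set.empty (fun s => PySem.Set.add s dd)
      else d) children
  children.items

-- ===== PRECONDITION & SPEC =====
def Spec_immediate_children_simple (codes : List String) (out : List (String × List String)) : Prop := out = immediate_children_simple_alt codes
instance (codes : List String) (out : List (String × List String)) : Decidable (Spec_immediate_children_simple codes out) := by unfold Spec_immediate_children_simple; infer_instance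

-- ===== CLAIM (what is proved, stated in full; the proofs are below) =====
def Claim_equal_immediate_children_simple : Prop := ∀ (codes : List String), Dom_immediate_children_simple codes → Spec_immediate_children_simple codes (immediate_children_simple codes)

-- ===== LEMMAS AND PROOFS =====

-- A's inner per-candidate condition, and B's parent/last projections
def ApredP (c dd : String) : Bool :=
  (PySem.Str.startswith dd (c ++ ".") && !PySem.Str.isIn "-" dd) &&
  ((PySem.Str.slice dd (some (PySem.Str.len (c ++ "."))) none != "") &&
   !PySem.Str.isIn "." (PySem.Str.slice dd (some (PySem.Str.len (c ++ "."))) none))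
def parentS (dd : String) : String := String.ofList (rsplitDot dd.toList).1
def lastS (dd : String) : String := String.ofList (rsplitDot dd.toList).2


lemma dropWhile_head_false {p : Char → Bool} {l t : List Char} {a : Char}
    (h : l.dropWhile p = a :: t) : p a = false := by
  induction l with
  | nil => cases h
  | cons x xs ih =>
    by_cases hp : p x
    · rw [List.dropWhile_cons_of_pos hp] at h; exact ih h
    · rw [List.dropWhile_cons_of_neg hp] at h; cases h; simpa using hp

lemma core_decomp (c d : List Char) :
    ((c ++ ['.']) <+: d ∧ d.drop (c.length + 1) ≠ [] ∧ '.' ∉ d.drop (c.length + 1))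
      ↔ ('.' ∈ d ∧ (rsplitDot d).1 = c ∧ (rsplitDot d).2 ≠ []) := by
  constructor
  · rintro ⟨⟨r, rfl⟩, hne, hnd⟩
    have hdrop : ((c ++ ['.']) ++ r).drop (c.length + 1) = r := by
      have h1 : (c ++ ['.']).length = c.length + 1 := by simp
      rw [← h1, List.drop_left]
    rw [hdrop] at hne hnd
    have hpos : ∀ x ∈ r.reverse, (x != '.') = true := by
      intro x hx
      simp only [bne_iff_ne, ne_eq]
      rintro rfl
      exact hnd (List.mem_reverse.1 hx)
    have htw : (r.reverse ++ '.' :: c.reverse).takeWhile (· != '.') = r.reverse := by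
      rw [List.takeWhile_append_of_pos hpos]; simp
    have hdw : (r.reverse ++ '.' :: c.reverse).dropWhile (· != '.') = '.' :: c.reverse := by
      rw [List.dropWhile_append_of_pos hpos]; simp
    refine ⟨by simp, ?_, ?_⟩
    · show ((((c ++ ['.']) ++ r).reverse.dropWhile (· != '.')).tail).reverse = c
      have hrev : ((c ++ ['.']) ++ r).reverse = r.reverse ++ '.' :: c.reverse := by simp
      rw [hrev, hdw]
      simp
    · show ((((c ++ ['.']) ++ r).reverse.takeWhile (· != '.'))).reverse ≠ []
      have hrev : ((c ++ ['.']) ++ r).reverse = r.reverse ++ '.' :: c.reverse := by simp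
      rw [hrev, htw]
      simpa using hne
  · rintro ⟨hdot, hpar, hlast⟩
    rcases hcase : d.reverse.dropWhile (· != '.') with _ | ⟨h0, u'⟩
    · exfalso
      have hall := List.dropWhile_eq_nil_iff.1 hcase
      have := hall '.' (List.mem_reverse.2 hdot)
      simp at this
    · have hhead : h0 = '.' := by
        have := dropWhile_head_false hcase
        simpa using this
      subst hhead
      set T := List.takeWhile (fun x => x != '.') d.reverse with hT
      have htu : T ++ '.' :: u' = d.reverse := by
        rw [← hcase]; exact List.takeWhile_append_dropWhile
      have hc : u'.reverse = c := by
        simpa [rsplitDot, hcase] using hpar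
      have hlast' : T.reverse ≠ [] := by
        simpa [rsplitDot, ← hT] using hlast
      have hnd : '.' ∉ T.reverse := by
        intro hx
        have := List.mem_takeWhile_imp (hT ▸ List.mem_reverse.1 hx)
        simp at this
      have hd' : d = (c ++ ['.']) ++ T.reverse := by
        have h2 := congrArg List.reverse htu
        simp only [List.reverse_append, List.reverse_cons, List.reverse_reverse] at h2
        rw [← h2, ← hc]
      have hdrop : d.drop (c.length + 1) = T.reverse := by
        rw [hd']
        have h1 : (c ++ ['.']).length = c.length + 1 := by simp
        rw [← h1, List.drop_left]
      exact ⟨⟨_, hd'.symm⟩, by rw [hdrop]; exact hlast', by rw [hdrop]; exact hnd⟩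


lemma isIn_singleton (a : Char) (s : String) :
    PySem.Str.isIn (String.ofList [a]) s = true ↔ a ∈ s.toList := by
  rw [PySem.Str.isIn_eq]
  rw [show (String.ofList [a]).toList = [a] by simp]
  rw [PySem.Chars.isIn_iff_infix]
  exact List.singleton_infix_iff a s.toList

lemma Apred_iff (c dd : String) :
    ApredP c dd = true ↔
      (PySem.Str.isIn "-" dd = false ∧ PySem.Str.isIn "." dd = true ∧ lastS dd ≠ "" ∧ parentS dd = c) := by
  have hslice : (PySem.Str.slice dd (some (PySem.Str.len (c ++ "."))) none).toList
      = dd.toList.drop (c.toList.length + 1) := by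
    have hplen : PySem.Str.len (c ++ ".") = ((c.toList.length : Int) + 1) := by
      rw [PySem.Str.len_eq]
      simp
    rw [hplen]
    rw [show (PySem.Str.slice dd (some ((c.toList.length : Int) + 1)) none).toList
          = PySem.List.slice dd.toList (some ((c.toList.length : Int) + 1)) none from by
        simp [PySem.Str.slice, PySem.Chars.slice]]
    rw [PySem.List.slice_from _ (by positivity)]
    norm_num
  have hsw : PySem.Str.startswith dd (c ++ ".") = true ↔ (c.toList ++ ['.']) <+: dd.toList := by
    rw [PySem.Str.startswith_eq, PySem.Chars.startswith_iff]
    simp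
  have hdash : PySem.Str.isIn "-" dd = false ↔ '-' ∉ dd.toList := by
    rw [← Bool.not_eq_true, show ("-" : String) = String.ofList ['-'] by rfl, isIn_singleton]
  have hdot : PySem.Str.isIn "." dd = true ↔ '.' ∈ dd.toList := by
    rw [show ("." : String) = String.ofList ['.'] by rfl, isIn_singleton]
  have hdot2 : PySem.Str.isIn "." (PySem.Str.slice dd (some (PySem.Str.len (c ++ "."))) none) = true
      ↔ '.' ∈ dd.toList.drop (c.toList.length + 1) := by
    rw [show ("." : String) = String.ofList ['.'] by rfl, isIn_singleton, hslice]
  have hne : (PySem.Str.slice dd (some (PySem.Str.len (c ++ "."))) none != "") = true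
      ↔ dd.toList.drop (c.toList.length + 1) ≠ [] := by
    rw [bne_iff_ne, ne_eq, ne_eq, ← String.toList_inj, hslice]
    simp
  have hpar : parentS dd = c ↔ (rsplitDot dd.toList).1 = c.toList := by
    constructor
    · intro h; rw [← h]; simp [parentS]
    · intro h; rw [parentS, h]; exact String.toList_inj.mp (by simp)
  have hlast : lastS dd ≠ "" ↔ (rsplitDot dd.toList).2 ≠ [] := by
    constructor
    · intro h hh; exact h (by rw [lastS, hh])
    · intro h hh
      exact h (by have := congrArg String.toList hh; simpa [lastS] using this)
  have hcore := core_decomp c.toList dd.toList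
  constructor
  · intro h
    simp only [ApredP, Bool.and_eq_true, Bool.not_eq_true'] at h
    obtain ⟨⟨h1, h2⟩, h3, h4⟩ := h
    have hc := hcore.1 ⟨hsw.1 h1, hne.1 h3, fun hm => by rw [← Bool.not_eq_true] at h4; exact h4 (hdot2.2 hm)⟩
    exact ⟨h2 ▸ rfl, hdot.2 hc.1, hlast.2 hc.2.2, hpar.2 hc.2.1⟩
  · rintro ⟨h1, h2, h3, h4⟩
    have hc := hcore.2 ⟨hdot.1 h2, hpar.1 h4, hlast.1 h3⟩
    simp only [ApredP, Bool.and_eq_true, Bool.not_eq_true']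
    refine ⟨⟨hsw.2 hc.1, h1⟩, hne.2 hc.2.1, ?_⟩
    rw [← Bool.not_eq_true]
    intro hcon
    exact hc.2.2 (hdot2.1 hcon)


lemma set_mem_update {x : String} (l : List String) (s : PySem.Set String) (h : x ∈ s ∨ x ∈ l) :
    x ∈ PySem.Set.update s l := by
  induction l generalizing s with
  | nil => simpa using h.resolve_right (by simp)
  | cons a t ih =>
    apply ih
    rcases h with h | h
    · exact Or.inl ((PySem.Set.mem_add s a x).2 (Or.inl h))
    · rcases List.mem_cons.1 h with rfl | h
      · exact Or.inl ((PySem.Set.mem_add s x x).2 (Or.inr rfl))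
      · exact Or.inr h

lemma set_update_of_subset (l : List String) (s : PySem.Set String) (h : ∀ x ∈ l, x ∈ s) :
    PySem.Set.update s l = s := by
  induction l generalizing s with
  | nil => rfl
  | cons a t ih =>
    have ha : PySem.Set.add s a = s := by
      simp [PySem.Set.add, h a (by simp)]
    show PySem.Set.update (PySem.Set.add s a) t = s
    rw [ha]
    exact ih s (fun x hx => h x (by simp [hx]))

lemma set_update_update (l : List String) (s : PySem.Set String) :
    PySem.Set.update (PySem.Set.update s l) l = PySem.Set.update s l :=
  set_update_of_subset l _ (fun _ hx => set_mem_update l s (Or.inr hx))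

lemma init_getD (cs : List String) (d0 : PySem.Dict String (PySem.Set String)) (k : String) :
    ((cs.foldl (fun d c => d.insert c PySem.Set.empty) d0).getD k PySem.Set.empty)
      = if k ∈ cs then PySem.Set.empty else d0.getD k PySem.Set.empty := by
  induction cs generalizing d0 with
  | nil => simp
  | cons c t ih =>
    simp only [List.foldl_cons, ih, PySem.Dict.getD_insert]
    by_cases hk : k ∈ t <;> by_cases hc : k = c <;> simp [hk, hc]

lemma inner_getD (p : String → Bool) (l : List String) (d : PySem.Dict String (PySem.Set String))
    (c k : String) :
    ((l.foldl (fun d2 dd => if p dd then d2.modify c PySem.Set.empty (fun s => PySem.Set.add s dd) else d2) d).getD k PySem.Set.empty)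
      = if k = c then PySem.Set.update (d.getD c PySem.Set.empty) (l.filter p) else d.getD k PySem.Set.empty := by
  induction l generalizing d with
  | nil =>
    simp only [List.foldl_nil, List.filter_nil]
    by_cases hk : k = c <;> simp [hk, PySem.Set.update]
  | cons dd t ih =>
    simp only [List.foldl_cons]
    by_cases hp : p dd
    · rw [ih, List.filter_cons_of_pos hp]
      by_cases hk : k = c
      · subst hk
        simp [hp, PySem.Set.update]
      · simp [hp, hk, PySem.Dict.getD_modify]
    · rw [ih, List.filter_cons_of_neg (by simpa using hp)]
      simp [hp]


lemma if_if_and {α : Type} (A B : Bool) (x y : α) :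
    (if A then (if B then x else y) else y) = if A && B then x else y := by
  cases A <;> simp

lemma stepA_body (codes : List String) (c : String) (d : PySem.Dict String (PySem.Set String)) :
    (codes.foldl (fun d2 dd =>
        if PySem.Str.startswith dd (c ++ ".") && !PySem.Str.isIn "-" dd then
          let remainder := PySem.Str.slice dd (some (PySem.Str.len (c ++ "."))) none
          if remainder != "" && !PySem.Str.isIn "." remainder then
            d2.modify c PySem.Set.empty (fun s => PySem.Set.add s dd)
          else d2
        else d2) d)
      = (codes.foldl (fun d2 dd => if ApredP c dd then d2.modify c PySem.Set.empty (fun s => PySem.Set.add s dd) else d2) d) := by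
  apply PySem.List.foldl_congr_mem
  intro acc dd _
  show (if _ then (if _ then _ else acc) else acc) = _
  rw [if_if_and]
  rfl

lemma outerA_getD (codes : List String) (outer : List String)
    (d : PySem.Dict String (PySem.Set String)) (k : String) :
    ((outer.foldl (fun d c =>
        if PySem.Str.isIn "-" c then d
        else codes.foldl (fun d2 dd => if ApredP c dd then d2.modify c PySem.Set.empty (fun s => PySem.Set.add s dd) else d2) d) d).getD k PySem.Set.empty)
      = if k ∈ outer ∧ PySem.Str.isIn "-" k = false
          then PySem.Set.update (d.getD k PySem.Set.empty) (codes.filter (ApredP k))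
          else d.getD k PySem.Set.empty := by
  induction outer generalizing d with
  | nil => simp
  | cons c t ih =>
    simp only [List.foldl_cons]
    rw [ih]
    by_cases hdc : PySem.Str.isIn "-" c = true
    · simp only [hdc, if_true]
      by_cases hm : k ∈ t ∧ PySem.Str.isIn "-" k = false
      · rw [if_pos hm, if_pos ⟨List.mem_cons_of_mem _ hm.1, hm.2⟩]
      · rw [if_neg hm, if_neg]
        rintro ⟨hk1, hk2⟩
        rcases List.mem_cons.1 hk1 with rfl | hk1
        · rw [hk2] at hdc; exact absurd hdc Bool.false_ne_true
        · exact hm ⟨hk1, hk2⟩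
    · simp only [Bool.not_eq_true] at hdc
      simp only [hdc, Bool.false_eq_true, if_false]
      rw [inner_getD]
      by_cases hk : k = c
      · subst hk
        have hdc' : PySem.Chars.isIn ['-'] k.toList = false := by
          simpa [PySem.Str.isIn_eq] using hdc
        by_cases hmt : k ∈ t <;> simp [hmt, hdc', set_update_update]
      · simp only [hk, if_false]
        by_cases hm : k ∈ t ∧ PySem.Str.isIn "-" k = false
        · rw [if_pos hm, if_pos ⟨List.mem_cons_of_mem _ hm.1, hm.2⟩]
        · rw [if_neg hm, if_neg]
          rintro ⟨hk1, hk2⟩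
          rcases List.mem_cons.1 hk1 with rfl | hk1
          · exact hk rfl
          · exact hm ⟨hk1, hk2⟩

lemma outerA_keys (codes : List String) (outer : List String)
    (d : PySem.Dict String (PySem.Set String)) (h : ∀ c ∈ outer, c ∈ d.keys) :
    (outer.foldl (fun d c =>
        if PySem.Str.isIn "-" c then d
        else codes.foldl (fun d2 dd => if ApredP c dd then d2.modify c PySem.Set.empty (fun s => PySem.Set.add s dd) else d2) d) d).keys = d.keys := by
  induction outer generalizing d with
  | nil => rfl
  | cons c t ih =>
    simp only [List.foldl_cons]
    have hstep : ∀ d' : PySem.Dict String (PySem.Set String), c ∈ d'.keys →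
        ((if PySem.Str.isIn "-" c then d'
          else codes.foldl (fun d2 dd => if ApredP c dd then d2.modify c PySem.Set.empty (fun s => PySem.Set.add s dd) else d2) d')).keys = d'.keys := by
      intro d' hc
      by_cases hb : PySem.Str.isIn "-" c = true
      · rw [if_pos hb]
      · rw [if_neg hb]
        rw [PySem.List.foldl_if_eq_foldl_filter (ApredP c)
              (fun d2 dd => d2.modify c PySem.Set.empty (fun s => PySem.Set.add s dd)) codes d']
        rw [show (fun (d2 : PySem.Dict String (PySem.Set String)) dd => d2.modify c PySem.Set.empty (fun s => PySem.Set.add s dd))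
              = (fun (d2 : PySem.Dict String (PySem.Set String)) dd => d2.modify ((fun _ => c) dd) PySem.Set.empty ((fun (_ : PySem.Dict String (PySem.Set String)) (dd : String) (s : PySem.Set String) => PySem.Set.add s dd) d2 dd)) from rfl]
        rw [PySem.Dict.keys_foldl_modify_key]
        apply set_update_of_subset
        intro x hx
        rcases List.mem_map.1 hx with ⟨y, _, rfl⟩
        exact hc
    rw [ih, hstep d (h c (by simp))]
    intro c' hc'
    rw [hstep d (h c (by simp))]
    exact h c' (List.mem_cons_of_mem _ hc')


lemma contains_stepB (d : PySem.Dict String (PySem.Set String)) (dd s : String) :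
    ((if PySem.Str.isIn "-" dd || !PySem.Str.isIn "." dd then d
      else
        if (lastS dd != "") && d.contains (parentS dd) then
          d.modify (parentS dd) PySem.Set.empty (fun t => PySem.Set.add t dd)
        else d)).contains s = d.contains s := by
  by_cases h1 : (PySem.Str.isIn "-" dd || !PySem.Str.isIn "." dd) = true
  · rw [if_pos h1]
  · rw [if_neg h1]
    by_cases h2 : ((lastS dd != "") && d.contains (parentS dd)) = true
    · rw [if_pos h2, PySem.Dict.contains_modify]
      have hc : d.contains (parentS dd) = true := by have h := h2; rw [Bool.and_eq_true] at h; exact h.2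
      by_cases hs : s = parentS dd
      · subst hs; simp [hc]
      · simp [hs]
    · rw [if_neg h2]

lemma stepB_keys (l : List String) (d : PySem.Dict String (PySem.Set String)) :
    (l.foldl (fun d dd =>
        if PySem.Str.isIn "-" dd || !PySem.Str.isIn "." dd then d
        else
          if (lastS dd != "") && d.contains (parentS dd) then
            d.modify (parentS dd) PySem.Set.empty (fun t => PySem.Set.add t dd)
          else d) d).keys = d.keys := by
  induction l generalizing d with
  | nil => rfl
  | cons dd t ih =>
    simp only [List.foldl_cons]
    rw [ih]
    by_cases h1 : (PySem.Str.isIn "-" dd || !PySem.Str.isIn "." dd) = true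
    · rw [if_pos h1]
    · rw [if_neg h1]
      by_cases h2 : ((lastS dd != "") && d.contains (parentS dd)) = true
      · rw [if_pos h2, PySem.Dict.keys_modify,
            PySem.Dict.keys_insert_of_contains _ _ (by have h := h2; rw [Bool.and_eq_true] at h; exact h.2)]
      · rw [if_neg h2]

lemma stepB_getD (l : List String) (d : PySem.Dict String (PySem.Set String)) (k : String) :
    ((l.foldl (fun d dd =>
        if PySem.Str.isIn "-" dd || !PySem.Str.isIn "." dd then d
        else
          if (lastS dd != "") && d.contains (parentS dd) then
            d.modify (parentS dd) PySem.Set.empty (fun t => PySem.Set.add t dd)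
          else d) d).getD k PySem.Set.empty)
      = PySem.Set.update (d.getD k PySem.Set.empty)
          (l.filter (fun dd => ((!PySem.Str.isIn "-" dd && PySem.Str.isIn "." dd) && (lastS dd != "")) && d.contains (parentS dd) && (parentS dd == k))) := by
  induction l generalizing d with
  | nil => rfl
  | cons dd t ih =>
    simp only [List.foldl_cons]
    rw [ih]
    have hcong : (t.filter (fun x => ((!PySem.Str.isIn "-" x && PySem.Str.isIn "." x) && (lastS x != "")) &&
          ((if PySem.Str.isIn "-" dd || !PySem.Str.isIn "." dd then d
            else
              if (lastS dd != "") && d.contains (parentS dd) then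
                d.modify (parentS dd) PySem.Set.empty (fun t => PySem.Set.add t dd)
              else d)).contains (parentS x) && (parentS x == k)))
        = (t.filter (fun x => ((!PySem.Str.isIn "-" x && PySem.Str.isIn "." x) && (lastS x != "")) && d.contains (parentS x) && (parentS x == k))) := by
      apply List.filter_congr
      intro x _
      rw [contains_stepB]
    rw [hcong]
    by_cases h1 : (PySem.Str.isIn "-" dd || !PySem.Str.isIn "." dd) = true
    · rw [if_pos h1]
      rw [Bool.or_eq_true] at h1
      rcases h1 with h | h
      · have h' : PySem.Chars.isIn ['-'] dd.toList = true := by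
          simpa [PySem.Str.isIn_eq] using h
        rw [List.filter_cons_of_neg (by simp [h'])]
      · simp only [Bool.not_eq_true'] at h
        have h' : PySem.Chars.isIn ['.'] dd.toList = false := by
          simpa [PySem.Str.isIn_eq] using h
        rw [List.filter_cons_of_neg (by simp [h'])]
    · rw [if_neg h1]
      have h1' := h1
      simp only [Bool.or_eq_true, not_or, Bool.not_eq_true, Bool.not_eq_true'] at h1'
      obtain ⟨hd1, hd2⟩ := h1'
      by_cases h2 : ((lastS dd != "") && d.contains (parentS dd)) = true
      · have h2' := h2
        rw [Bool.and_eq_true] at h2'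
        obtain ⟨hl, hc⟩ := h2'
        have hd1' : PySem.Chars.isIn ['-'] dd.toList = false := by
          simpa [PySem.Str.isIn_eq] using hd1
        have hd2' : PySem.Chars.isIn ['.'] dd.toList = true := by
          simpa [PySem.Str.isIn_eq] using hd2
        rw [if_pos h2]
        by_cases hk : parentS dd = k
        · rw [List.filter_cons_of_pos (by simp [hd1', hd2', hl, hk, show d.contains k = true from hk ▸ hc])]
          rw [PySem.Dict.getD_modify]
          rw [if_pos hk.symm, hk]
          rfl
        · rw [List.filter_cons_of_neg (by simp [hk])]
          rw [PySem.Dict.getD_modify, if_neg (fun hkk => hk hkk.symm)]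
      · rw [if_neg h2]
        by_cases hl : (lastS dd != "") = true
        · have hc : d.contains (parentS dd) = false := by
            cases hcv : d.contains (parentS dd)
            · rfl
            · exact absurd (by rw [Bool.and_eq_true]; exact ⟨hl, hcv⟩) h2
          rw [List.filter_cons_of_neg (by simp [hc])]
        · have hl' : lastS dd = "" := by simpa using hl
          rw [List.filter_cons_of_neg (by simp [hl'])]

lemma Apred_false_of_dash (k dd : String) (h : PySem.Str.isIn "-" k = true) :
    ApredP k dd = false := by
  cases hA : ApredP k dd
  · rfl
  exfalso
  obtain ⟨h1, _, _, h4⟩ := (Apred_iff k dd).1 hA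
  have hk : '-' ∈ k.toList := by
    rw [show ("-" : String) = String.ofList ['-'] from rfl] at h
    exact (isIn_singleton '-' k).1 h
  have hkl : k.toList = (rsplitDot dd.toList).1 := by
    rw [← h4]
    simp [parentS]
  have hmem : '-' ∈ dd.toList := by
    rw [hkl] at hk
    have h5 : '-' ∈ ((dd.toList.reverse.dropWhile (· != '.')).tail) := by
      simpa [rsplitDot] using hk
    have h6 := (List.tail_sublist _).subset h5
    have h7 := (List.dropWhile_sublist _).subset h6
    exact List.mem_reverse.1 h7
  have : '-' ∉ dd.toList := by
    rw [show ("-" : String) = String.ofList ['-'] from rfl] at h1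
    intro hm
    rw [(isIn_singleton '-' dd).2 hm] at h1
    cases h1
  exact this hmem

lemma init_keys (codes : List String) :
    (codes.foldl (fun d c => d.insert c PySem.Set.empty) (PySem.Dict.empty : PySem.Dict String (PySem.Set String))).keys
      = PySem.Set.ofList codes := by
  rw [PySem.Dict.keys_foldl_insert codes (fun _ _ => PySem.Set.empty)]
  rfl

lemma itemsA_eq (codes : List String) :
    immediate_children_simple codes
      = (PySem.Set.ofList codes).map
          (fun k => (k, PySem.Set.update PySem.Set.empty (codes.filter (ApredP k)))) := by
  have h0 : immediate_children_simple codes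
      = (codes.foldl (fun d c =>
            if PySem.Str.isIn "-" c then d
            else codes.foldl (fun d2 dd =>
              if PySem.Str.startswith dd (c ++ ".") && !PySem.Str.isIn "-" dd then
                if (PySem.Str.slice dd (some (PySem.Str.len (c ++ "."))) none != "") &&
                    !PySem.Str.isIn "." (PySem.Str.slice dd (some (PySem.Str.len (c ++ "."))) none) then
                  d2.modify c PySem.Set.empty (fun s => PySem.Set.add s dd)
                else d2
              else d2) d)
          (codes.foldl (fun d c => d.insert c PySem.Set.empty) PySem.Dict.empty)).items := rfl
  have h1 : (codes.foldl (fun d c =>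
            if PySem.Str.isIn "-" c then d
            else codes.foldl (fun d2 dd =>
              if PySem.Str.startswith dd (c ++ ".") && !PySem.Str.isIn "-" dd then
                if (PySem.Str.slice dd (some (PySem.Str.len (c ++ "."))) none != "") &&
                    !PySem.Str.isIn "." (PySem.Str.slice dd (some (PySem.Str.len (c ++ "."))) none) then
                  d2.modify c PySem.Set.empty (fun s => PySem.Set.add s dd)
                else d2
              else d2) d)
          (codes.foldl (fun d c => d.insert c PySem.Set.empty) PySem.Dict.empty))
      = (codes.foldl (fun d c =>
            if PySem.Str.isIn "-" c then d
            else codes.foldl (fun d2 dd => if ApredP c dd then d2.modify c PySem.Set.empty (fun s => PySem.Set.add s dd) else d2) d)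
          (codes.foldl (fun d c => d.insert c PySem.Set.empty) PySem.Dict.empty)) := by
    apply PySem.List.foldl_congr_mem
    intro acc c _
    by_cases hc : PySem.Str.isIn "-" c = true
    · rw [if_pos hc, if_pos hc]
    · rw [if_neg hc, if_neg hc]
      exact stepA_body codes c acc
  rw [h0, h1]
  have hkeys : (codes.foldl (fun d c =>
            if PySem.Str.isIn "-" c then d
            else codes.foldl (fun d2 dd => if ApredP c dd then d2.modify c PySem.Set.empty (fun s => PySem.Set.add s dd) else d2) d)
          (codes.foldl (fun d c => d.insert c PySem.Set.empty) PySem.Dict.empty)).keys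
      = PySem.Set.ofList codes := by
    rw [outerA_keys, init_keys]
    intro c hc
    rw [init_keys]
    exact (PySem.Set.mem_ofList codes c).2 hc
  rw [PySem.Dict.items_eq_map_keys _ (by rw [hkeys]; exact PySem.Set.nodup_ofList codes) PySem.Set.empty]
  rw [hkeys]
  apply List.map_congr_left
  intro k hk
  have hkc : k ∈ codes := (PySem.Set.mem_ofList codes k).1 hk
  rw [outerA_getD, init_getD]
  by_cases hd : PySem.Str.isIn "-" k = true
  · rw [if_neg (by rintro ⟨_, h2⟩; rw [hd] at h2; cases h2), if_pos hkc]
    have hfil : codes.filter (ApredP k) = [] :=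
      List.filter_eq_nil_iff.2 (fun a _ => by rw [Apred_false_of_dash k a hd]; simp)
    rw [hfil]
    rfl
  · simp only [Bool.not_eq_true] at hd
    rw [if_pos ⟨hkc, hd⟩, if_pos hkc]

lemma itemsB_eq (codes : List String) :
    immediate_children_simple_alt codes
      = (PySem.Set.ofList codes).map
          (fun k => (k, PySem.Set.update PySem.Set.empty
              (codes.filter (fun dd => ((!PySem.Str.isIn "-" dd && PySem.Str.isIn "." dd) && (lastS dd != "")) && decide (parentS dd ∈ PySem.Set.ofList codes) && (parentS dd == k))))) := by
  have h0 : immediate_children_simple_alt codes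
      = (codes.foldl (fun d dd =>
            if PySem.Str.isIn "-" dd || !PySem.Str.isIn "." dd then d
            else
              if (lastS dd != "") && d.contains (parentS dd) then
                d.modify (parentS dd) PySem.Set.empty (fun t => PySem.Set.add t dd)
              else d)
          (codes.foldl (fun d c => d.insert c PySem.Set.empty) PySem.Dict.empty)).items := rfl
  rw [h0]
  have hkeys : (codes.foldl (fun d dd =>
            if PySem.Str.isIn "-" dd || !PySem.Str.isIn "." dd then d
            else
              if (lastS dd != "") && d.contains (parentS dd) then
                d.modify (parentS dd) PySem.Set.empty (fun t => PySem.Set.add t dd)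
              else d)
          (codes.foldl (fun d c => d.insert c PySem.Set.empty) PySem.Dict.empty)).keys
      = PySem.Set.ofList codes := by
    rw [stepB_keys, init_keys]
  rw [PySem.Dict.items_eq_map_keys _ (by rw [hkeys]; exact PySem.Set.nodup_ofList codes) PySem.Set.empty]
  rw [hkeys]
  apply List.map_congr_left
  intro k hk
  have hkc : k ∈ codes := (PySem.Set.mem_ofList codes k).1 hk
  rw [stepB_getD, init_getD]
  rw [if_pos hkc]
  apply congrArg (fun l => (k, PySem.Set.update PySem.Set.empty l))
  apply List.filter_congr
  intro dd _
  congr 2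
  rw [PySem.Dict.contains_eq_decide_mem_keys, init_keys]

-- the two per-element filters coincide on keys of the dict
lemma filters_eq (codes : List String) (k : String) (hk : k ∈ codes) :
    codes.filter (ApredP k)
      = codes.filter (fun dd => ((!PySem.Str.isIn "-" dd && PySem.Str.isIn "." dd) && (lastS dd != "")) && decide (parentS dd ∈ PySem.Set.ofList codes) && (parentS dd == k)) := by
  apply List.filter_congr
  intro dd _
  by_cases hpk : parentS dd = k
  · have hmem : decide (parentS dd ∈ PySem.Set.ofList codes) = true := by
      rw [hpk]
      exact decide_eq_true ((PySem.Set.mem_ofList codes k).2 hk)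
    have hbeq : (parentS dd == k) = true := by
      rw [hpk]; simp
    rw [hmem, hbeq]
    cases hA : ApredP k dd
    · cases h1 : PySem.Str.isIn "-" dd
      · cases h2 : PySem.Str.isIn "." dd
        · simp
        · cases h3 : (lastS dd != "")
          · simp
          · exfalso
            have : ApredP k dd = true :=
              (Apred_iff k dd).2 ⟨h1, h2, by simpa using h3, hpk⟩
            rw [hA] at this; cases this
      · simp
    · obtain ⟨h1, h2, h3, _⟩ := (Apred_iff k dd).1 hA
      have h1' : PySem.Chars.isIn ['-'] dd.toList = false := by
        simpa [PySem.Str.isIn_eq] using h1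
      have h2' : PySem.Chars.isIn ['.'] dd.toList = true := by
        simpa [PySem.Str.isIn_eq] using h2
      simp [h1', h2', h3]
  · have hbeq : (parentS dd == k) = false := by
      simpa using hpk
    rw [hbeq]
    cases hA : ApredP k dd
    · simp
    · exact absurd ((Apred_iff k dd).1 hA).2.2.2 hpk

-- ===== VERDICT (by name: the statement is the Claim_ definition above) =====
theorem immediate_children_simple_spec : Claim_equal_immediate_children_simple := by
  intro codes _
  unfold Spec_immediate_children_simple
  rw [itemsA_eq, itemsB_eq]
  apply List.map_congr_left
  intro k hk
  rw [filters_eq codes k ((PySem.Set.mem_ofList codes k).1 hk)]
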